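-- pv_equiv track=rewrite | github.com/tony474747/Regular | main.py | merge_contacts
-- ===== SOURCE A (Python) =====
-- def merge_contacts(contacts_list):
--     """
--     Объединить все дублирующиеся записи о человеке в одну
--     """
--     surname = {}
--     fixed_list = [contacts_list[0]]
--
--     for index, row in enumerate(contacts_list[1:]):
--         if row[0] not in surname.keys():
--             surname[row[0]] = index + 1
--
--         else:
--             fix_row = contacts_list[surname[row[0]]]
--             for i in range(1, 7):
--                 fix_row[i] = fix_row[i] or row[i]
--
--     for index in surname.values():
--         fixed_list.append(contacts_list[index])
--
--     return fixed_list
-- ===== SOURCE B (Python) =====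
-- def merge_contacts(contacts_list):
--     """
--     Merge duplicate records by surname: first group the tail rows by surname,
--     then fold each group into its first row (mutated in place, like A).
--     """
--     groups = {}
--     for row in contacts_list[1:]:
--         groups.setdefault(row[0], []).append(row)
--
--     fixed_list = [contacts_list[0]]
--     for rows in groups.values():
--         target = rows[0]
--         for member in rows[1:]:
--             for i in range(1, 7):
--                 target[i] = target[i] or member[i]
--         fixed_list.append(target)
--     return fixed_list
-- ===== Notes on version B (the rewrite author's own statement) =====
-- stated objective: alternative
-- what changed: A merges duplicates inline while walking the enumerated tail, keeping a surname->index dict and mutating the original list positions; B separates the work into two passes: group tail rows by surname into a surname->rows dict, then fold each group's rows into its first row and emit the groups in first-occurrence order.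
import Mathlib
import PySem

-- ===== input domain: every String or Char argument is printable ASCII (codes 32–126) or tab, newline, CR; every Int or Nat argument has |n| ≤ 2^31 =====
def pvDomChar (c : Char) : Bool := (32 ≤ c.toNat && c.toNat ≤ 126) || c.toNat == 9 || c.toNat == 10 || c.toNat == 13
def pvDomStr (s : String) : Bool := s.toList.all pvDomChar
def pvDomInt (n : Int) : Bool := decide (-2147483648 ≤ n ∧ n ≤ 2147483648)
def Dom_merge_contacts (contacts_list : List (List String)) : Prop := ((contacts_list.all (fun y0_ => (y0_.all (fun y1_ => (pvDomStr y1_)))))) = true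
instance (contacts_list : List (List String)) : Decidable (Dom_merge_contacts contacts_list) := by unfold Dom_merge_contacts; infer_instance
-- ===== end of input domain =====

-- B regroups A's inline dict-and-mutate merge into two passes (group by surname, then fold
-- each group); equivalence is about the RETURN value (both Pythons mutate the merged rows
-- of contacts_list in place in the same way).

-- ===== PORT A =====

-- 'x or y' on Python strings: x if truthy (nonempty) else y.  Both Pythons contain the
-- inner loop 'for i in range(1, 7): fix[i] = fix[i] or row[i]', ported once here.
def pvOr (a b : String) : String := if a = "" then b else a

def mergeFields (fix_row row : List String) : List String :=
  (PySem.List.pyRange 1 7 1).foldl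
    (fun fr i => PySem.List.pySetD fr i (pvOr (PySem.List.pyGetD fr i "") (PySem.List.pyGetD row i ""))) fix_row

-- A's single loop over enumerate(contacts_list[1:]): state = (surname dict, the mutable
-- contacts_list).  row[0] is ported totally as pyGetD row 0 "" (exact on nonempty rows;
-- empty tail rows raise IndexError in Python and are excluded by Pre_).
def mcLoopA : List (Int × List String) → PySem.Dict String Int → List (List String) →
    PySem.Dict String Int × List (List String)
  | [], d, cl => (d, cl)
  | (index, row) :: rest, d, cl =>
    let key := PySem.List.pyGetD row 0 ""
    match d.get? key with
    | none => mcLoopA rest (d.insert key (index + 1)) cl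
    | some j => mcLoopA rest d (PySem.List.pySetD cl j (mergeFields (PySem.List.pyGetD cl j []) row))

def merge_contacts (contacts_list : List (List String)) : List (List String) :=
  match contacts_list with
  | [] => []                         -- Python: contacts_list[0] raises IndexError; excluded by Pre_
  | first :: rest =>
    let st := mcLoopA (PySem.List.enumerate rest 0) PySem.Dict.empty contacts_list
    first :: st.1.values.map (fun j => PySem.List.pyGetD st.2 j [])

-- ===== PORT B =====

-- pass 1: groups.setdefault(row[0], []).append(row)
def mcGroupB : List (List String) → PySem.Dict String (List (List String)) →
    PySem.Dict String (List (List String))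
  | [], g => g
  | row :: rest, g =>
    let key := PySem.List.pyGetD row 0 ""
    mcGroupB rest (g.insert key (g.getD key [] ++ [row]))

-- pass 2: fold one group into its first row
def mergeGroupB (rows : List (List String)) : List String :=
  match rows with
  | [] => []                         -- unreachable: every group is nonempty
  | t :: ms => ms.foldl mergeFields t

def merge_contacts_alt (contacts_list : List (List String)) : List (List String) :=
  match contacts_list with
  | [] => []                         -- Python: contacts_list[0] raises IndexError; excluded by Pre_
  | first :: rest =>
    first :: (mcGroupB rest PySem.Dict.empty).values.map mergeGroupB

-- ===== PRECONDITION & SPEC =====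

-- Pre_ excludes exactly the inputs where Python A can raise IndexError: the empty list
-- (contacts_list[0]), empty tail rows (row[0]) and duplicate-surname tail rows shorter than
-- 7 fields (the merge loop indexes fields 1..6; on a few such inputs the short-circuiting
-- 'or' never reaches the short row and A still returns — see the cite — so Pre_ is slightly
-- conservative there).
def Pre_merge_contacts (contacts_list : List (List String)) : Prop :=
  contacts_list ≠ [] ∧
  ∀ i ∈ List.range contacts_list.tail.length,
    (contacts_list.tail.getD i []) ≠ [] ∧
    ((∃ j ∈ List.range contacts_list.tail.length, j ≠ i ∧
        (contacts_list.tail.getD j []).headD "" = (contacts_list.tail.getD i []).headD "")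
      → 7 ≤ (contacts_list.tail.getD i []).length)

instance (contacts_list : List (List String)) : Decidable (Pre_merge_contacts contacts_list) := by
  unfold Pre_merge_contacts; infer_instance

def pvWitness_merge_contacts : List (List String) :=
  [["hdr"], ["Ivanov", "", "i@x", "", "", "", ""], ["Petrov", "1", "", "", "", "", ""],
   ["Ivanov", "7", "", "", "2", "", ""]]

def Spec_merge_contacts (contacts_list : List (List String)) (out : List (List String)) : Prop := out = merge_contacts_alt contacts_list
instance (contacts_list : List (List String)) (out : List (List String)) : Decidable (Spec_merge_contacts contacts_list out) := by unfold Spec_merge_contacts; infer_instance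

-- ===== CLAIM (what is proved, stated in full; the proofs are below) =====
def Claim_equal_merge_contacts : Prop := ∀ (contacts_list : List (List String)), Dom_merge_contacts contacts_list → Pre_merge_contacts contacts_list → Spec_merge_contacts contacts_list (merge_contacts contacts_list)

-- ===== LEMMAS AND PROOFS =====

-- The loop invariant tying A's state (dict of first-occurrence indices + mutated list) to
-- B's grouping dict: same keys in the same order, and at each surname the merged row A
-- keeps at its stored index equals the fold of B's group.
def mcInv (s : Nat) (d : PySem.Dict String Int) (g : PySem.Dict String (List (List String)))
    (cl : List (List String)) : Prop :=
  d.keys = g.keys ∧ d.keys.Nodup ∧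
  ∀ k ∈ d.keys, ∃ n : Nat, d.getD k 0 = (n : Int) ∧ 1 ≤ n ∧ n < s + 1 ∧ n < cl.length ∧
    (∀ k' ∈ d.keys, k' ≠ k → d.getD k' 0 ≠ (n : Int)) ∧
    g.getD k [] ≠ [] ∧ cl.getD n [] = mergeGroupB (g.getD k [])

theorem mergeGroupB_snoc (t : List String) (ms : List (List String)) (row : List String) :
    mergeGroupB ((t :: ms) ++ [row]) = mergeFields (mergeGroupB (t :: ms)) row := by
  simp [mergeGroupB, List.foldl_append]

theorem pyGetD_nat (xs : List (List String)) (n : Nat) (d : List String) :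
    PySem.List.pyGetD xs (n : Int) d = xs.getD n d := by
  simp

theorem getD_set_self (l : List (List String)) (n : Nat) (v : List String) (h : n < l.length) :
    (l.set n v).getD n [] = v := by simp [List.getD, h]

theorem getD_set_ne (l : List (List String)) (n m : Nat) (v : List String) (h : m ≠ n) :
    (l.set n v).getD m [] = l.getD m [] := by
  simp [List.getD, List.getElem?_set_ne (Ne.symm h)]

theorem keys_ins_not_mem {ν : Type} (d : PySem.Dict String ν) (k : String) (v : ν)
    (h : k ∉ d.keys) : (d.insert k v).keys = d.keys ++ [k] := by
  apply PySem.Dict.keys_insert_of_not_contains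
  rw [← Bool.not_eq_true, PySem.Dict.contains_iff_mem_keys]; exact h

theorem keys_ins_mem {ν : Type} (d : PySem.Dict String ν) (k : String) (v : ν)
    (h : k ∈ d.keys) : (d.insert k v).keys = d.keys := by
  apply PySem.Dict.keys_insert_of_contains
  rw [PySem.Dict.contains_iff_mem_keys]; exact h

theorem loop_eq : ∀ (l : List (List String)) (s : Nat) (d : PySem.Dict String Int)
    (g : PySem.Dict String (List (List String))) (cl : List (List String)),
    mcInv s d g cl →
    (∀ m (_ : m < l.length), cl.getD (s + 1 + m) [] = l[m]! ∧ s + 1 + m < cl.length) →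
    (mcLoopA (PySem.List.enumerate l (s : Int)) d cl).1.values.map
        (fun j => PySem.List.pyGetD (mcLoopA (PySem.List.enumerate l (s : Int)) d cl).2 j []) =
      (mcGroupB l g).values.map mergeGroupB := by
  intro l
  induction l with
  | nil =>
    intro s d g cl hInv _
    obtain ⟨hkeys, hnd, hent⟩ := hInv
    simp only [PySem.List.enumerate_nil, mcLoopA, mcGroupB]
    rw [PySem.Dict.values_eq_map_keys d hnd 0,
        PySem.Dict.values_eq_map_keys g (hkeys ▸ hnd) [], ← hkeys,
        List.map_map, List.map_map]
    apply List.map_congr_left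
    intro k hk
    obtain ⟨n, hval, _, _, _, _, _, hmerge⟩ := hent k hk
    simp only [Function.comp, hval, pyGetD_nat, hmerge]
  | cons row l ih =>
    intro s d g cl hInv hfut
    obtain ⟨hkeys, hnd, hent⟩ := hInv
    have hcast : (s : Int) + 1 = ((s + 1 : Nat) : Int) := by push_cast; ring
    rw [PySem.List.enumerate_cons]
    simp only [mcLoopA, mcGroupB]
    cases hget : d.get? (PySem.List.pyGetD row 0 "") with
    | none =>
      set key := PySem.List.pyGetD row 0 "" with hkeydef
      have hkmem : key ∉ d.keys := (PySem.Dict.get?_eq_none_iff_not_mem_keys d key).mp hget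
      have hgmem : key ∉ g.keys := hkeys ▸ hkmem
      have hgD : g.getD key [] = [] := by
        apply PySem.Dict.getD_of_not_contains
        rw [← Bool.not_eq_true, PySem.Dict.contains_iff_mem_keys]; exact hgmem
      rw [hgD, hcast]
      apply ih (s + 1) (d.insert key ((s : Int) + 1)) (g.insert key ([] ++ [row])) cl
      · -- the invariant after inserting a fresh surname
        refine ⟨?_, ?_, ?_⟩
        · rw [keys_ins_not_mem d key _ hkmem, keys_ins_not_mem g key _ hgmem, hkeys]
        · exact PySem.Dict.nodup_keys_insert d key _ hnd
        · intro k hk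
          rw [keys_ins_not_mem d key _ hkmem, List.mem_append] at hk
          rcases hk with hk | hk
          · have hne : k ≠ key := fun h => hkmem (by rw [← h]; exact hk)
            obtain ⟨n, hval, h1, hs, hlen, hdist, hgne, hmerge⟩ := hent k hk
            refine ⟨n, ?_, h1, by omega, hlen, ?_, ?_, ?_⟩
            · rw [PySem.Dict.getD_insert_of_ne d _ _ hne]; exact hval
            · intro k' hk' hk'ne
              rw [keys_ins_not_mem d key _ hkmem, List.mem_append] at hk'
              rcases hk' with hk' | hk'
              · rw [PySem.Dict.getD_insert_of_ne d _ _ (fun h => hkmem (by rw [← h]; exact hk'))]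
                exact hdist k' hk' hk'ne
              · simp only [List.mem_singleton] at hk'
                subst hk'
                rw [PySem.Dict.getD_insert_self, hcast]
                intro hc
                have : s + 1 = n := by exact_mod_cast hc
                omega
            · rw [PySem.Dict.getD_insert_of_ne g _ _ hne]; exact hgne
            · rw [PySem.Dict.getD_insert_of_ne g _ _ hne]; exact hmerge
          · simp only [List.mem_singleton] at hk
            subst hk
            refine ⟨s + 1, by rw [PySem.Dict.getD_insert_self, hcast], by omega, by omega,
              ?_, ?_, ?_, ?_⟩
            · have := (hfut 0 (by simp)).2; simpa using this
            · intro k' hk' hk'ne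
              rw [keys_ins_not_mem d key _ hkmem, List.mem_append] at hk'
              rcases hk' with hk' | hk'
              · obtain ⟨n', hval', _, hs', _, _, _, _⟩ := hent k' hk'
                rw [PySem.Dict.getD_insert_of_ne d _ _ (fun h => hkmem (by rw [← h]; exact hk')), hval']
                intro hc
                have : n' = s + 1 := by exact_mod_cast hc
                omega
              · simp only [List.mem_singleton] at hk'
                exact absurd hk' hk'ne
            · rw [PySem.Dict.getD_insert_self]; simp
            · rw [PySem.Dict.getD_insert_self]
              have h0 := (hfut 0 (by simp)).1
              simpa [mergeGroupB] using h0
      · -- the untouched tail of contacts_list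
        intro m hm
        have h1 := hfut (m + 1) (by simpa using Nat.succ_lt_succ hm)
        have harith : s + 1 + (m + 1) = s + 1 + 1 + m := by omega
        rw [harith] at h1
        simpa using h1
    | some j =>
      set key := PySem.List.pyGetD row 0 "" with hkeydef
      have hkmem : key ∈ d.keys := by
        by_contra hk
        rw [(PySem.Dict.get?_eq_none_iff_not_mem_keys d key).mpr hk] at hget
        cases hget
      have hgkmem : key ∈ g.keys := by rw [← hkeys]; exact hkmem
      have hjd : d.getD key 0 = j := by rw [PySem.Dict.getD_eq_get?_getD, hget]; rfl
      obtain ⟨n, hval, h1, hs, hlen, hdist, hgne, hmerge⟩ := hent key hkmem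
      have hjn : j = (n : Int) := by rw [← hjd, hval]
      obtain ⟨t, ms, hg⟩ : ∃ t ms, g.getD key [] = t :: ms := by
        cases hgl : g.getD key [] with
        | nil => exact absurd hgl hgne
        | cons t ms => exact ⟨t, ms, rfl⟩
      rw [hjn]
      simp only []
      rw [PySem.List.pySetD_natCast, pyGetD_nat, hcast]
      set v := mergeFields (cl.getD n []) row with hvdef
      have hv : v = mergeGroupB (g.getD key [] ++ [row]) := by
        rw [hg, mergeGroupB_snoc, ← hg, hvdef, hmerge]
      apply ih (s + 1) d (g.insert key (g.getD key [] ++ [row])) (cl.set n v)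
      · refine ⟨?_, hnd, ?_⟩
        · rw [keys_ins_mem g key _ hgkmem, hkeys]
        · intro k hk
          by_cases hkk : k = key
          · subst hkk
            refine ⟨n, hval, h1, by omega, by simpa using hlen, ?_, ?_, ?_⟩
            · intro k' hk' hk'ne; exact hdist k' hk' hk'ne
            · rw [PySem.Dict.getD_insert_self]; simp [hg]
            · rw [PySem.Dict.getD_insert_self, getD_set_self cl n v hlen, hv]
          · obtain ⟨nk, hvalk, h1k, hsk, hlenk, hdistk, hgnek, hmergek⟩ := hent k hk
            have hnkn : nk ≠ n := by
              intro h
              exact hdist k hk hkk (h ▸ hvalk)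
            refine ⟨nk, hvalk, h1k, by omega, by simpa using hlenk, hdistk, ?_, ?_⟩
            · rw [PySem.Dict.getD_insert_of_ne g _ _ hkk]; exact hgnek
            · rw [PySem.Dict.getD_insert_of_ne g _ _ hkk, getD_set_ne cl n nk v hnkn]
              exact hmergek
      · intro m hm
        have h1' := hfut (m + 1) (by simpa using Nat.succ_lt_succ hm)
        have harith : s + 1 + (m + 1) = s + 1 + 1 + m := by omega
        rw [harith] at h1'
        constructor
        · rw [getD_set_ne cl n _ v (by omega)]
          simpa using h1'.1
        · simpa using h1'.2

theorem main_eq (contacts_list : List (List String)) :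
    merge_contacts contacts_list = merge_contacts_alt contacts_list := by
  cases contacts_list with
  | nil => rfl
  | cons first rest =>
    simp only [merge_contacts, merge_contacts_alt]
    congr 1
    have h0 : ((0 : Nat) : Int) = (0 : Int) := rfl
    rw [← h0]
    apply loop_eq rest 0 PySem.Dict.empty PySem.Dict.empty (first :: rest)
    · refine ⟨by simp, by simp, ?_⟩
      intro k hk
      simp at hk
    · intro m hm
      have harith : 0 + 1 + m = m + 1 := by omega
      rw [harith]
      refine ⟨?_, by simp only [List.length_cons]; omega⟩
      simp only [List.getD, List.getElem?_cons_succ, List.getElem!_eq_getElem?_getD]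
      rfl

-- ===== VERDICT (by name: the statement is the Claim_ definition above) =====
theorem merge_contacts_spec : Claim_equal_merge_contacts := by
  intro contacts_list _ _
  unfold Spec_merge_contacts
  exact main_eq contacts_list
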